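-- pv_equiv track=rewrite | github.com/junobonnie/Chzzk-timeline-search-engine | app.py | peak_start
-- ===== SOURCE A (Python) =====
-- def peak_start(signal, height):
--     start_index = []
--     end_index = []
--     is_start = False
--     for i, s in enumerate(signal):
--         if s > height and not is_start:
--             start_index.append(i)
--             is_start = True
--         if s <= height and is_start:
--             end_index.append(i)
--             is_start = False
--     return start_index, end_index
-- ===== SOURCE B (Python) =====
-- def peak_start(sig, height):
--     mask = [s > height for s in sig]
--     pairs = list(enumerate(zip([False] + mask, mask)))
--     starts = [i for i, (prev, cur) in pairs if cur and not prev]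
--     ends = [i for i, (prev, cur) in pairs if prev and not cur]
--     return starts, ends
-- ===== Notes on version B (the rewrite author's own statement) =====
-- stated objective: alternative
-- what changed: B replaces A's stateful single pass with a flag by a two-phase computation: build the boolean mask signal>height, then detect rising/falling edges by comparing each mask bit to its predecessor (False before index 0) in two filter passes.
import Mathlib
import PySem

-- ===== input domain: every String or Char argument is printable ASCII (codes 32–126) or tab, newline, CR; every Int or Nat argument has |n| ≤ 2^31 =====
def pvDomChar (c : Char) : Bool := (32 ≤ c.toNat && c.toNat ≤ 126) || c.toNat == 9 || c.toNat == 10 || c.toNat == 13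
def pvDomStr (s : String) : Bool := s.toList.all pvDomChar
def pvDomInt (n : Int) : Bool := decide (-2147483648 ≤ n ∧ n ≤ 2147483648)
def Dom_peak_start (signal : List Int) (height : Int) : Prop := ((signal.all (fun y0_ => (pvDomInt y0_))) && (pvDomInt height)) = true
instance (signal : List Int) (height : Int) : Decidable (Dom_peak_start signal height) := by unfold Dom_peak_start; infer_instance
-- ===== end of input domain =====

-- B changes the decomposition (mask then edge detection vs A's stateful flag loop); same O(n) cost, no speed claim.

-- ===== PORT A =====
-- loop body of A: the two sequential ifs, updating (start_index, end_index, is_start)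
def peakStep (height : Int) (st : List Int × List Int × Bool) (p : Int × Int) :
    List Int × List Int × Bool :=
  let st1 := if height < p.2 ∧ st.2.2 = false then (st.1 ++ [p.1], st.2.1, true) else st
  if p.2 ≤ height ∧ st1.2.2 = true then (st1.1, st1.2.1 ++ [p.1], false) else st1

def peak_start (signal : List Int) (height : Int) : List Int × List Int :=
  let r := (PySem.List.enumerate signal 0).foldl (peakStep height) ([], [], false)
  (r.1, r.2.1)

-- ===== PORT B =====
def peak_start_alt (signal : List Int) (height : Int) : List Int × List Int :=
  let mask := signal.map (fun s => decide (height < s))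
  let pairs := PySem.List.enumerate (List.zip (false :: mask) mask) 0
  (pairs.filterMap (fun q => if q.2.2 && !q.2.1 then some q.1 else none),
   pairs.filterMap (fun q => if q.2.1 && !q.2.2 then some q.1 else none))

-- ===== PRECONDITION & SPEC =====
def Spec_peak_start (signal : List Int) (height : Int) (out : List Int × List Int) : Prop := out = peak_start_alt signal height
instance (signal : List Int) (height : Int) (out : List Int × List Int) : Decidable (Spec_peak_start signal height out) := by unfold Spec_peak_start; infer_instance

-- ===== CLAIM (what is proved, stated in full; the proofs are below) =====
def Claim_equal_peak_start : Prop := ∀ (signal : List Int) (height : Int), Dom_peak_start signal height → Spec_peak_start signal height (peak_start signal height)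

-- ===== LEMMAS AND PROOFS =====

-- common characterisation: edges of signal `t` starting at index `n` with previous mask bit `b`
def goPeaks (h : Int) : Int → Bool → List Int → List Int × List Int
  | _, _, [] => ([], [])
  | n, b, s :: t =>
    let c := decide (h < s)
    let r := goPeaks h (n + 1) c t
    (if c && !b then n :: r.1 else r.1, if b && !c then n :: r.2 else r.2)

-- the value of A's flag after the loop
def flagAfter (h : Int) : Bool → List Int → Bool
  | b, [] => b
  | _, s :: t => flagAfter h (decide (h < s)) t

theorem loopA (h : Int) : ∀ (t : List Int) (n : Int) (ss es : List Int) (b : Bool),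
    (PySem.List.enumerate t n).foldl (peakStep h) (ss, es, b) =
      (ss ++ (goPeaks h n b t).1, es ++ (goPeaks h n b t).2, flagAfter h b t) := by
  intro t
  induction t with
  | nil => intro n ss es b; simp [goPeaks, flagAfter]
  | cons s t ih =>
    intro n ss es b
    rw [PySem.List.enumerate_cons, List.foldl_cons]
    by_cases hc : h < s
    · have : peakStep h (ss, es, b) (n, s) = (if b then ss else ss ++ [n], es, true) := by
        cases b <;> simp [peakStep, hc]
      rw [this, ih]
      cases b <;> simp [goPeaks, flagAfter, hc]
    · have : peakStep h (ss, es, b) (n, s) = (ss, if b then es ++ [n] else es, false) := by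
        cases b <;> simp [peakStep, hc, not_lt.mp hc]
      rw [this, ih]
      cases b <;> simp [goPeaks, flagAfter, hc]

theorem loopB (h : Int) : ∀ (t : List Int) (n : Int) (b : Bool),
    ((PySem.List.enumerate
        (List.zip (b :: t.map (fun s => decide (h < s))) (t.map (fun s => decide (h < s)))) n).filterMap
        (fun q => if q.2.2 && !q.2.1 then some q.1 else none),
     (PySem.List.enumerate
        (List.zip (b :: t.map (fun s => decide (h < s))) (t.map (fun s => decide (h < s)))) n).filterMap
        (fun q => if q.2.1 && !q.2.2 then some q.1 else none)) = goPeaks h n b t := by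
  intro t
  induction t with
  | nil => intro n b; simp [goPeaks]
  | cons s t ih =>
    intro n b
    simp only [List.map_cons, List.zip_cons_cons, PySem.List.enumerate_cons, List.filterMap_cons]
    have := ih (n + 1) (decide (h < s))
    by_cases hc : h < s
    · cases b <;>
        simpa [goPeaks, hc, Prod.ext_iff] using congrArg (fun r => (r.1, r.2)) this
    · cases b <;>
        simpa [goPeaks, hc, Prod.ext_iff] using congrArg (fun r => (r.1, r.2)) this

-- ===== VERDICT (by name: the statement is the Claim_ definition above) =====
theorem peak_start_spec : Claim_equal_peak_start := by
  intro signal height _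
  unfold Spec_peak_start peak_start peak_start_alt
  rw [loopA height signal 0 [] [] false]
  have hB := loopB height signal 0 false
  simp only [Prod.ext_iff] at hB ⊢
  exact ⟨hB.1.symm.trans (by simp), hB.2.symm.trans (by simp)⟩
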